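-- pv_equiv track=rewrite | github.com/ArtRabs/word_twist_game | word_twist_game.py | is_valid_word
-- ===== SOURCE A (Python) =====
-- import collections
--
-- def is_valid_word(submission, original_scrambled_word, dictionary_words, guessed_words):
--
--     submission = submission.strip().lower()
--
--     if not submission.isalpha():
--         return False, "Invalid input. Please enter only letters."
--
--     if submission in guessed_words:
--         return False, "Invalid input. You've already guessed that word!"
--
--     if submission not in dictionary_words:
--         return False, f"'{submission}' is not in our dictionary."
--
--     submission_counts = collections.Counter(submission)
--     scrambled_counts = collections.Counter(original_scrambled_word)
--
--     for char, count in submission_counts.items():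
--         if count > scrambled_counts.get(char,0):
--             return False, f"'{submission}' uses letters not available in '{original_scrambled_word}' (or too many of them)."
--
--     return True, "Correct!"
-- ===== SOURCE B (Python) =====
-- def is_valid_word(submission, original_scrambled_word, dictionary_words, guessed_words):
--     submission = submission.strip().lower()
--
--     if not submission.isalpha():
--         return False, "Invalid input. Please enter only letters."
--
--     if submission in guessed_words:
--         return False, "Invalid input. You've already guessed that word!"
--
--     if submission not in dictionary_words:
--         return False, f"'{submission}' is not in our dictionary."
--
--     pool = list(original_scrambled_word)
--     for ch in submission:
--         if ch in pool:
--             pool.remove(ch)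
--         else:
--             return False, f"'{submission}' uses letters not available in '{original_scrambled_word}' (or too many of them)."
--
--     return True, "Correct!"
-- ===== Notes on version B (the rewrite author's own statement) =====
-- stated objective: alternative
-- what changed: Replaces the two collections.Counter builds and the per-distinct-letter count comparison with a single per-character walk over the submission that removes each required letter from a shrinking pool of the scrambled letters, failing the instant a letter is missing.
import Mathlib
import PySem

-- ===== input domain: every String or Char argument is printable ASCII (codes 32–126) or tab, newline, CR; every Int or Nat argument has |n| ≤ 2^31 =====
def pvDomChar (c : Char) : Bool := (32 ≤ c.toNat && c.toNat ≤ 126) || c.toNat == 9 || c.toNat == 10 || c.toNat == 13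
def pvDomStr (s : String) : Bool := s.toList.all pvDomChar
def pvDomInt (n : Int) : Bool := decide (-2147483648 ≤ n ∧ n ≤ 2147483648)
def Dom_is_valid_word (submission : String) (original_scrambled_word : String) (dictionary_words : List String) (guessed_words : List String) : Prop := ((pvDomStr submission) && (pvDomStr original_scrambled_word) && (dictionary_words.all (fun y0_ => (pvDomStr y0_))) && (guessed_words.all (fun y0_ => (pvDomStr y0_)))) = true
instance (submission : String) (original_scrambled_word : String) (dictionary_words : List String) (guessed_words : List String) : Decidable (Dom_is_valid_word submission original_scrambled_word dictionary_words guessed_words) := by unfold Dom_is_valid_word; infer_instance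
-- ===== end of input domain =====

-- B replaces A's two Counter builds and per-distinct-letter count comparison by a per-character
-- walk over the submission consuming letters from a shrinking pool of the scrambled letters
-- (alternative decomposition, same exact results and messages).


-- ===== PORT A =====
-- A's 'for char, count in submission_counts.items(): if count > scrambled_counts.get(char,0): return …'
def pvLoopA (submission : String) (original_scrambled_word : String)
    (scrambled_counts : PySem.Dict Char Int) : List (Char × Int) → Bool × String
  | [] => (true, "Correct!")
  | (char, count) :: rest =>
      if scrambled_counts.getD char 0 < count then
        (false, "'" ++ submission ++ "' uses letters not available in '" ++ original_scrambled_word ++ "' (or too many of them).")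
      else pvLoopA submission original_scrambled_word scrambled_counts rest

def is_valid_word (submission : String) (original_scrambled_word : String) (dictionary_words : List String) (guessed_words : List String) : Bool × String :=
  let submission := PySem.Str.lower (PySem.Str.strip submission)
  if !(PySem.Str.strIsalpha submission) then
    (false, "Invalid input. Please enter only letters.")
  else if guessed_words.contains submission then
    (false, "Invalid input. You've already guessed that word!")
  else if !(dictionary_words.contains submission) then
    (false, "'" ++ submission ++ "' is not in our dictionary.")
  else
    let submission_counts := PySem.Dict.counter submission.toList
    let scrambled_counts := PySem.Dict.counter original_scrambled_word.toList
    pvLoopA submission original_scrambled_word scrambled_counts submission_counts.items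

-- ===== PORT B =====
-- B's 'for ch in submission: pool.remove(ch) or fail' — greedy consumption of the pool
def pvConsume : List Char → List Char → Bool
  | [], _ => true
  | ch :: rest, pool =>
      match PySem.List.remove? pool ch with
      | some pool' => pvConsume rest pool'
      | none => false

def is_valid_word_alt (submission : String) (original_scrambled_word : String) (dictionary_words : List String) (guessed_words : List String) : Bool × String :=
  let submission := PySem.Str.lower (PySem.Str.strip submission)
  if !(PySem.Str.strIsalpha submission) then
    (false, "Invalid input. Please enter only letters.")
  else if guessed_words.contains submission then
    (false, "Invalid input. You've already guessed that word!")
  else if !(dictionary_words.contains submission) then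
    (false, "'" ++ submission ++ "' is not in our dictionary.")
  else if pvConsume submission.toList original_scrambled_word.toList then
    (true, "Correct!")
  else
    (false, "'" ++ submission ++ "' uses letters not available in '" ++ original_scrambled_word ++ "' (or too many of them).")

-- ===== PRECONDITION & SPEC =====
def Spec_is_valid_word (submission : String) (original_scrambled_word : String) (dictionary_words : List String) (guessed_words : List String) (out : Bool × String) : Prop := out = is_valid_word_alt submission original_scrambled_word dictionary_words guessed_words
instance (submission : String) (original_scrambled_word : String) (dictionary_words : List String) (guessed_words : List String) (out : Bool × String) : Decidable (Spec_is_valid_word submission original_scrambled_word dictionary_words guessed_words out) := by unfold Spec_is_valid_word; infer_instance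

-- ===== CLAIM (what is proved, stated in full; the proofs are below) =====
def Claim_equal_is_valid_word : Prop := ∀ (submission : String) (original_scrambled_word : String) (dictionary_words : List String) (guessed_words : List String), Dom_is_valid_word submission original_scrambled_word dictionary_words guessed_words → Spec_is_valid_word submission original_scrambled_word dictionary_words guessed_words (is_valid_word submission original_scrambled_word dictionary_words guessed_words)

-- ===== LEMMAS AND PROOFS =====

-- A's loop returns the error iff some listed count exceeds the pool's
theorem pvLoopA_eq (sub scr : String) (oc : PySem.Dict Char Int) (l : List (Char × Int)) :
    pvLoopA sub scr oc l =
      if l.any (fun p => decide (oc.getD p.1 0 < p.2)) then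
        (false, "'" ++ sub ++ "' uses letters not available in '" ++ scr ++ "' (or too many of them).")
      else (true, "Correct!") := by
  induction l with
  | nil => simp [pvLoopA]
  | cons p rest ih =>
      obtain ⟨c, n⟩ := p
      by_cases h : oc.getD c 0 < n
      · simp [pvLoopA, h]
      · rw [pvLoopA, if_neg h, ih, List.any_cons,
          show (decide (oc.getD c 0 < n)) = false from decide_eq_false h, Bool.false_or]

-- greedy pool consumption succeeds iff every letter's multiplicity fits in the pool
theorem pvConsume_iff (s pool : List Char) :
    pvConsume s pool = true ↔ ∀ c ∈ s, s.count c ≤ pool.count c := by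
  induction s generalizing pool with
  | nil => simp [pvConsume]
  | cons ch rest ih =>
      by_cases hmem : ch ∈ pool
      · have h1 : 1 ≤ pool.count ch := List.one_le_count_iff.mpr hmem
        have hrem := PySem.List.remove?_eq_some_erase (v := ch) (xs := pool) hmem
        rw [pvConsume, hrem]
        simp only [ih]
        constructor
        · intro h c hc0
          rcases List.mem_cons.mp hc0 with hceq | hcr
          · subst hceq
            by_cases hr : c ∈ rest
            · have := h c hr
              rw [List.count_erase_self] at this
              simp only [List.count_cons_self]
              omega
            · rw [List.count_cons_self, List.count_eq_zero_of_not_mem hr]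
              omega
          · by_cases hec : c = ch
            · subst hec
              have := h c hcr
              rw [List.count_erase_self] at this
              simp only [List.count_cons_self]
              omega
            · have := h c hcr
              rw [List.count_erase_of_ne hec] at this
              rw [List.count_cons_of_ne (Ne.symm hec)]
              exact this
        · intro h c hc
          by_cases hec : c = ch
          · subst hec
            have := h c List.mem_cons_self
            rw [List.count_cons_self] at this
            rw [List.count_erase_self]
            omega
          · have := h c (List.mem_cons_of_mem _ hc)
            rw [List.count_cons_of_ne (Ne.symm hec)] at this
            rw [List.count_erase_of_ne hec]
            exact this
      · have hrem := PySem.List.remove?_eq_none_iff (v := ch) (xs := pool) |>.mpr hmem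
        rw [pvConsume, hrem]
        constructor
        · intro h; cases h
        · intro h
          have := h ch List.mem_cons_self
          rw [List.count_cons_self, List.count_eq_zero_of_not_mem hmem] at this
          omega

-- A's exceed-test over the Counter items equals failure of B's greedy consumption
theorem any_eq_not_consume (s pool : List Char) :
    ((PySem.Dict.counter s).items.any
        (fun p => decide ((PySem.Dict.counter pool).getD p.1 0 < p.2)))
      = !(pvConsume s pool) := by
  rcases hb : pvConsume s pool with _ | _
  · have : ¬ ∀ c ∈ s, s.count c ≤ pool.count c := by
      intro h; rw [← pvConsume_iff] at h; simp [hb] at h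
    push_neg at this
    obtain ⟨c, hc, hlt⟩ := this
    simp only [PySem.Dict.items_counter, List.any_map, Bool.not_false, List.any_eq_true,
      Function.comp]
    refine ⟨c, (PySem.Set.mem_ofList _ _).mpr hc, ?_⟩
    simp only [PySem.Dict.getD_counter, decide_eq_true_eq]
    exact_mod_cast hlt
  · have h := (pvConsume_iff s pool).mp hb
    simp only [PySem.Dict.items_counter, List.any_map, Bool.not_true, List.any_eq_false,
      Function.comp]
    intro c hc
    have hcs : c ∈ s := (PySem.Set.mem_ofList _ _).mp hc
    simp only [PySem.Dict.getD_counter, decide_eq_true_eq, not_lt]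
    exact_mod_cast h c hcs

-- the innermost branch of A equals the innermost branch of B
theorem inner_eq (sub scr : String) :
    pvLoopA sub scr (PySem.Dict.counter scr.toList) (PySem.Dict.counter sub.toList).items =
      if pvConsume sub.toList scr.toList then (true, "Correct!")
      else (false, "'" ++ sub ++ "' uses letters not available in '" ++ scr ++ "' (or too many of them).") := by
  rw [pvLoopA_eq, any_eq_not_consume]
  rcases pvConsume sub.toList scr.toList <;> simp

-- ===== VERDICT (by name: the statement is the Claim_ definition above) =====
theorem is_valid_word_spec : Claim_equal_is_valid_word := by
  intro submission original_scrambled_word dictionary_words guessed_words _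
  unfold Spec_is_valid_word
  simp only [is_valid_word, is_valid_word_alt, inner_eq]
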